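-- pv_equiv track=rewrite | github.com/FreeCAD/FPA | code/bookkeepingScripts/commonAddCorporate.py | isCorporateDonor
-- ===== SOURCE A (Python) =====
-- def isCorporateDonor(donorName):
--     corporateTokens = ["co", "ltd", "cie", "ltee", "bv", "nv", "sa", "llc", "llp", "ltee", "ltda", "pty", "gmbh", "spa", "tech", "technology", "engineering", "partners", "inc", "usa", "design", "germany", "photography", "corporation", "enterprises", "construction", "&", "et", "l l c", "systems", "group", "com", "supply", "business", "electronics", "tool"]
--     name = "  {0}  ".format(donorName.lower())
--     name = name.replace(".", " ")
--     name = name.replace(",", " ")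
--     name = name.replace(")", " ")
--     name = name.replace("(",  " ")
--     for token in corporateTokens:
--         testableToken = " {0} ".format(token)
--         tokenCount = name.count(testableToken)
--         if tokenCount:
--             return True
--     return False
-- ===== SOURCE B (Python) =====
-- def isCorporateDonor(donorName):
--     # single-word tokens kept as one space-separated literal; norm built in one char pass
--     singles = frozenset(
--         "co ltd cie ltee bv nv sa llc llp ltda pty gmbh spa tech technology "
--         "engineering partners inc usa design germany photography corporation "
--         "enterprises construction & et systems group com supply business "
--         "electronics tool".split())
--     norm = "".join(" " if ch in ".,()" else ch for ch in donorName.lower())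
--     if " l l c " in "  {0}  ".format(norm):
--         return True
--     return any(word in singles for word in norm.split(" "))
-- ===== Notes on version B (the rewrite author's own statement) =====
-- stated objective: alternative
-- what changed: Instead of scanning the whole name once per token (35 padded-substring searches over a four-pass-replaced string), B normalizes in a single per-character pass, does one substring test for the lone multi-word token ' l l c ', and splits the normalized name on ' ' once, testing each word against a frozenset built by splitting one space-separated token literal.
import Mathlib
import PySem

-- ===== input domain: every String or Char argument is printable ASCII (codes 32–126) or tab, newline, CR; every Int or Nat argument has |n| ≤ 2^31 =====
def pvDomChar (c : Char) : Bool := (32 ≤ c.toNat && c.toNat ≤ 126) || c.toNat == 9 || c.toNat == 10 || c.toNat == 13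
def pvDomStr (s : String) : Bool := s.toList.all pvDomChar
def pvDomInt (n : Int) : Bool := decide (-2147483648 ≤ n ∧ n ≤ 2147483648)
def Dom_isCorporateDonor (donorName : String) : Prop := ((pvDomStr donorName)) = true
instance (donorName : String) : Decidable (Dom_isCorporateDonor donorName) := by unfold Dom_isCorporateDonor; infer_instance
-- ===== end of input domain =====

-- B replaces A's 35 per-token padded-substring scans by: one char-map pass that normalizes the
-- name, one substring test for the lone multi-word token " l l c ", and a split of the
-- normalized name on ' ' tested word-by-word against a set of the single-word tokens
-- (objective: alternative algorithm, same results).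

-- ===== PORT A =====
def corporateTokens : List String :=
  ["co", "ltd", "cie", "ltee", "bv", "nv", "sa", "llc", "llp", "ltee", "ltda", "pty",
   "gmbh", "spa", "tech", "technology", "engineering", "partners", "inc", "usa", "design",
   "germany", "photography", "corporation", "enterprises", "construction", "&", "et",
   "l l c", "systems", "group", "com", "supply", "business", "electronics", "tool"]

def loopA (name : String) : List String → Bool
  | [] => false
  | token :: rest =>
    let testableToken := " " ++ token ++ " "
    let tokenCount := PySem.Str.count name testableToken
    if tokenCount ≠ 0 then true else loopA name rest

def isCorporateDonor (donorName : String) : Bool :=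
  let name := "  " ++ PySem.Str.lower donorName ++ "  "
  let name := PySem.Str.replace name "." " "
  let name := PySem.Str.replace name "," " "
  let name := PySem.Str.replace name ")" " "
  let name := PySem.Str.replace name "(" " "
  loopA name corporateTokens

-- ===== PORT B =====
-- Source B keeps the single-word tokens as ONE space-separated literal and splits it once
def pvBigTokens : String :=
  "co ltd cie ltee bv nv sa llc llp ltda pty gmbh spa tech technology engineering partners inc usa design germany photography corporation enterprises construction & et systems group com supply business electronics tool"

-- ' " " if ch in ".,()" else ch ' of Source B's generator expression
def pvNormChar (ch : Char) : Char := if ".,()".toList.contains ch then ' ' else ch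

def isCorporateDonor_alt (donorName : String) : Bool :=
  let singles := PySem.Set.ofList (PySem.Str.split₀ pvBigTokens)
  let norm := String.ofList ((PySem.Str.lower donorName).toList.map pvNormChar)
  if PySem.Str.isIn " l l c " ("  " ++ norm ++ "  ") then true
  else (List.map String.ofList (PySem.Chars.splitOn norm.toList [' '])).any
         (fun w => singles.contains w)

-- ===== PRECONDITION & SPEC =====
def Spec_isCorporateDonor (donorName : String) (out : Bool) : Prop := out = isCorporateDonor_alt donorName
instance (donorName : String) (out : Bool) : Decidable (Spec_isCorporateDonor donorName out) := by unfold Spec_isCorporateDonor; infer_instance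

-- ===== CLAIM (what is proved, stated in full; the proofs are below) =====
def Claim_equal_isCorporateDonor : Prop := ∀ (donorName : String), Dom_isCorporateDonor donorName → Spec_isCorporateDonor donorName (isCorporateDonor donorName)

-- ===== LEMMAS AND PROOFS =====

theorem countgo_ge (fuel : Nat) : ∀ (sub l : List Char) (acc : Nat),
    acc ≤ PySem.Chars.count.go sub fuel l acc := by
  induction fuel with
  | zero => intro sub l acc; cases l <;> simp [PySem.Chars.count.go]
  | succ f ih =>
    intro sub l acc
    cases l with
    | nil => simp [PySem.Chars.count.go]
    | cons c t =>
      rw [PySem.Chars.count.go]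
      split
      · exact le_trans (Nat.le_succ acc) (ih _ _ _)
      · exact ih _ _ _

theorem countgo_ne_iff (fuel : Nat) : ∀ (sub l : List Char) (acc : Nat), sub ≠ [] →
    l.length ≤ fuel → (PySem.Chars.count.go sub fuel l acc ≠ acc ↔ sub <:+: l) := by
  induction fuel with
  | zero =>
    intro sub l acc hs hl
    have : l = [] := by cases l <;> simp_all
    subst this
    simp [PySem.Chars.count.go, hs]
  | succ f ih =>
    intro sub l acc hs hl
    cases l with
    | nil => simp [PySem.Chars.count.go, hs]
    | cons c t =>
      rw [PySem.Chars.count.go]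
      split
      · rename_i hpre
        constructor
        · intro _
          exact ((List.isPrefixOf_iff_prefix).mp hpre).isInfix
        · intro _
          have := countgo_ge f sub (List.drop sub.length (c :: t)) (acc + 1)
          omega
      · rename_i hpre
        have hnp : ¬ sub <+: (c :: t) := fun h => hpre ((List.isPrefixOf_iff_prefix).mpr h)
        rw [ih sub t acc hs (by simpa using Nat.lt_succ_iff.mp (by simpa using hl)),
            List.infix_cons_iff]
        tauto

theorem count_ne_zero_iff (l sub : List Char) (h : sub ≠ []) :
    (PySem.Chars.count l sub ≠ 0 ↔ sub <:+: l) := by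
  have : sub.isEmpty = false := by cases sub <;> simp_all
  rw [PySem.Chars.count, this]
  simpa using countgo_ne_iff l.length sub l 0 h le_rfl

theorem replacego_single (fuel : Nat) : ∀ (a b : Char) (l acc : List Char), l.length ≤ fuel →
    PySem.Chars.replace.go [a] [b] fuel l acc
      = acc.reverse ++ l.map (fun c => if c = a then b else c) := by
  induction fuel with
  | zero =>
    intro a b l acc hl
    have : l = [] := by cases l <;> simp_all
    subst this
    simp [PySem.Chars.replace.go]
  | succ f ih =>
    intro a b l acc hl
    cases l with
    | nil => simp [PySem.Chars.replace.go]
    | cons c t =>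
      rw [PySem.Chars.replace.go]
      have ht : t.length ≤ f := by simpa using hl
      by_cases hca : c = a
      · have hpre : [a].isPrefixOf (c :: t) = true := by simp [List.isPrefixOf, hca]
        rw [if_pos hpre]
        show PySem.Chars.replace.go [a] [b] f t (b :: acc) = _
        rw [ih a b t (b :: acc) ht]; simp [hca]
      · have hpre : ¬ ([a].isPrefixOf (c :: t) = true) := by simp [List.isPrefixOf]; tauto
        rw [if_neg hpre]
        rw [ih a b t (c :: acc) ht]; simp [hca]

theorem replace_single (a b : Char) (l : List Char) :
    PySem.Chars.replace l [a] [b] = l.map (fun c => if c = a then b else c) := by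
  rw [PySem.Chars.replace]
  simpa using replacego_single l.length a b l [] le_rfl

-- proof-side explicit list of the single-word tokens (the ports never use it)
def singleTokens : List (List Char) :=
  ["co".toList, "ltd".toList, "cie".toList, "ltee".toList, "bv".toList, "nv".toList,
   "sa".toList, "llc".toList, "llp".toList, "ltda".toList, "pty".toList, "gmbh".toList,
   "spa".toList, "tech".toList, "technology".toList, "engineering".toList,
   "partners".toList, "inc".toList, "usa".toList, "design".toList, "germany".toList,
   "photography".toList, "corporation".toList, "enterprises".toList,
   "construction".toList, "&".toList, "et".toList, "systems".toList, "group".toList,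
   "com".toList, "supply".toList, "business".toList, "electronics".toList, "tool".toList]

-- proof-side word scanner: words of l split on ' ' (empties kept), word = current accumulator
def wordsB : List Char → List Char → List (List Char)
  | [], word => [word]
  | c :: rest, word =>
    if c = ' ' then word :: wordsB rest [] else wordsB rest (word ++ [c])

theorem wordsB_append_sep : ∀ (p word r : List Char), ' ' ∉ p →
    wordsB (p ++ ' ' :: r) word = (word ++ p) :: wordsB r [] := by
  intro p
  induction p with
  | nil => intro word r _; simp [wordsB]
  | cons c p' ih =>
    intro word r hp
    have hc : c ≠ ' ' := fun h => hp (by simp [h])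
    rw [List.cons_append, wordsB, if_neg hc, ih (word ++ [c]) r (fun h => hp (by simp [h]))]
    simp

theorem eq_of_nospace_append (t p b r : List Char) (ht : ' ' ∉ t) (hp : ' ' ∉ p)
    (h : t ++ [' '] ++ b = p ++ [' '] ++ r) : t = p ∧ b = r := by
  rw [List.append_assoc, List.append_assoc] at h
  rcases List.append_eq_append_iff.mp h with ⟨as, h1, h2⟩ | ⟨bs, h1, h2⟩
  · cases as with
    | nil => simp_all
    | cons a as' =>
      exfalso
      have : a = ' ' := by
        have := congrArg List.head? h2; simpa using this.symm
      exact hp (h1 ▸ (by simp [this]))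
  · cases bs with
    | nil => simp_all
    | cons a as' =>
      exfalso
      have : a = ' ' := by
        have := congrArg List.head? h2; simpa using this.symm
      exact ht (h1 ▸ (by simp [this]))

theorem space_mem_of_append_eq (a t p : List Char) (ht : t ≠ [])
    (h : p ++ [' '] = a ++ t) : ' ' ∈ t := by
  have h1 : (a ++ t).getLast? = t.getLast? := List.getLast?_append_of_ne_nil a ht
  have h2 : (p ++ [' ']).getLast? = some ' ' := by simp
  rw [h, h1] at h2
  exact List.mem_of_getLast? h2

theorem mem_wordsB_iff (n : Nat) : ∀ (l t : List Char), l.length = n → t ≠ [] → ' ' ∉ t →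
    (t ∈ wordsB (l ++ [' ']) [] ↔
      ∃ a b, l ++ [' '] = a ++ t ++ [' '] ++ b ∧ (a = [] ∨ ∃ a', a = a' ++ [' '])) := by
  induction n using Nat.strong_induction_on with
  | _ n ih =>
  intro l t hlen hne hsp
  have hdec : l.takeWhile (fun c => c ≠ ' ') ++ l.dropWhile (fun c => c ≠ ' ') = l :=
    List.takeWhile_append_dropWhile
  have hpns : ' ' ∉ l.takeWhile (fun c => (c ≠ ' ' : Bool)) := by
    intro hmem
    have := List.mem_takeWhile_imp hmem
    simp at this
  cases hq : l.dropWhile (fun c => (c ≠ ' ' : Bool)) with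
  | nil =>
    have hl : ' ' ∉ l := by
      rw [← hdec, hq]; simpa using hpns
    have hw : wordsB (l ++ [' ']) [] = [l, []] := by
      rw [wordsB_append_sep l [] [] hl]; simp [wordsB]
    rw [hw]
    constructor
    · intro hmem
      have ht : t = l := by
        rcases (by simpa using hmem : t = l ∨ t = []) with h | h
        · exact h
        · exact absurd h hne
      exact ⟨[], [], by simp [ht], Or.inl rfl⟩
    · rintro ⟨a, b, heq, ha⟩
      have heq' : a ++ (t ++ [' '] ++ b) = l ++ [' '] := by
        rw [heq]; simp
      rcases List.append_eq_append_iff.mp heq' with ⟨as, h1, h2⟩ | ⟨bs, h1, h2⟩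
      · have hns : ' ' ∉ as := fun hm => hl (h1 ▸ List.mem_append_right a hm)
        have h2' : t ++ [' '] ++ b = as ++ [' '] ++ [] := by simpa using h2
        obtain ⟨hta, hb⟩ := eq_of_nospace_append t as b [] hsp hns h2'
        rcases ha with ha | ⟨a', ha⟩
        · subst ha; simp_all
        · exfalso
          exact hl (h1 ▸ List.mem_append_left as (ha ▸ List.mem_append_right a' (by simp)))
      · exfalso
        have := congrArg List.length h2
        simp at this
        have htl : 0 < t.length := List.length_pos_of_ne_nil hne
        omega
  | cons c r =>
    have hc : c = ' ' := by
      have := List.head?_dropWhile_not (fun x => (x ≠ ' ' : Bool)) l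
      rw [hq] at this; simpa using this
    subst hc
    set p := l.takeWhile (fun c => (c ≠ ' ' : Bool)) with hp
    have hlp : l = p ++ ' ' :: r := by rw [← hdec, hq]
    have hrlen : r.length < n := by
      subst hlen; rw [hlp]; simp; omega
    have IH := ih r.length hrlen r t rfl hne hsp
    have hw : wordsB (l ++ [' ']) [] = p :: wordsB (r ++ [' ']) [] := by
      rw [hlp, List.append_assoc, List.cons_append]
      exact wordsB_append_sep p [] (r ++ [' ']) hpns
    rw [hw]
    constructor
    · intro hmem
      rcases List.mem_cons.mp hmem with htp | hmem'
      · refine ⟨[], r ++ [' '], ?_, Or.inl rfl⟩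
        rw [hlp, htp]; simp
      · obtain ⟨a, b, heq, ha⟩ := IH.mp hmem'
        refine ⟨p ++ ' ' :: a, b, ?_, ?_⟩
        · rw [hlp]; simp only [List.cons_append, List.append_assoc]; rw [heq]; simp
        · rcases ha with ha | ⟨a', ha⟩
          · exact Or.inr ⟨p, by simp [ha]⟩
          · exact Or.inr ⟨p ++ ' ' :: a', by simp [ha]⟩
    · rintro ⟨a, b, heq, ha⟩
      have heq' : a ++ (t ++ [' '] ++ b) = (p ++ [' ']) ++ (r ++ [' ']) := by
        rw [show a ++ (t ++ [' '] ++ b) = a ++ t ++ [' '] ++ b by simp, ← heq, hlp]; simp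
      rcases List.append_eq_append_iff.mp heq' with ⟨as, h1, h2⟩ | ⟨bs, h1, h2⟩
      · rcases List.append_eq_append_iff.mp (by simpa [List.append_assoc] using h2 :
            t ++ ([' '] ++ b) = as ++ (r ++ [' '])) with ⟨u, h3, h4⟩ | ⟨u, h3, h4⟩
        · cases u with
          | nil =>
            exfalso
            rw [h3] at h1; simp at h1
            exact hsp (space_mem_of_append_eq a t p hne h1)
          | cons u₀ u' =>
            have hu : u₀ = ' ' := by
              have := congrArg List.head? h4; simpa using this.symm
            subst hu
            rcases ha with ha | ⟨a', ha⟩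
            · subst ha
              simp at h1
              have h1' : t ++ [' '] ++ u' = p ++ [' '] ++ [] := by
                simp only [List.append_nil]
                rw [h1, h3]; simp
              have htp := (eq_of_nospace_append t p u' [] hsp hpns h1').1
              rw [htp]
              exact List.mem_cons_self ..
            · exfalso
              have hcnt := congrArg (List.count ' ') h1
              rw [ha, h3] at hcnt
              have hpc : p.count ' ' = 0 := List.count_eq_zero.mpr hpns
              have htc : t.count ' ' = 0 := List.count_eq_zero.mpr hsp
              simp [List.count_append, hpc, htc] at hcnt
              omega
        · cases as with
          | nil =>
            simp at h1 h3
            right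
            exact IH.mpr ⟨[], b, by rw [← h3] at h4; simpa [List.append_assoc] using h4, Or.inl rfl⟩
          | cons a₀ as' =>
            exfalso
            have : ' ' ∈ a₀ :: as' := space_mem_of_append_eq a (a₀ :: as') p (by simp) h1
            exact hsp (h3 ▸ List.mem_append_left u this)
      · right
        refine IH.mpr ⟨bs, b, by simpa [List.append_assoc] using h2, ?_⟩
        rcases ha with ha | ⟨a', ha⟩
        · exfalso; rw [ha] at h1; simp at h1
        · cases hbs : bs with
          | nil => exact Or.inl rfl
          | cons b₀ bs' =>
            right
            have hlast : bs.getLast? = some ' ' := by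
              have h1' : a' ++ [' '] = (p ++ [' ']) ++ bs := by rw [← ha, h1]
              have := congrArg List.getLast? h1'
              rw [List.getLast?_append_of_ne_nil (p ++ [' ']) (by rw [hbs]; simp)] at this
              simpa using this.symm
            exact ⟨bs.dropLast, by rw [← hbs]; exact (List.dropLast_append_getLast? ' ' hlast).symm⟩

theorem core (mid t : List Char) (hne : t ≠ []) (hsp : ' ' ∉ t) :
    (t ∈ wordsB ((' ' :: mid) ++ [' ']) [] ↔
      (' ' :: (t ++ [' '])) <:+: ((' ' :: mid) ++ [' '])) := by
  rw [mem_wordsB_iff (' ' :: mid).length (' ' :: mid) t rfl hne hsp]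
  constructor
  · rintro ⟨a, b, heq, ha | ⟨a', ha⟩⟩
    · subst ha
      exfalso
      cases t with
      | nil => exact hne rfl
      | cons t₀ ts =>
        have : ' ' = t₀ := by
          have := congrArg List.head? heq; simpa using this
        exact hsp (by simp [← this])
    · refine ⟨a', b, ?_⟩
      rw [ha] at heq
      rw [heq]; simp
  · rintro ⟨s, u, h⟩
    refine ⟨s ++ [' '], u, ?_, Or.inr ⟨s, rfl⟩⟩
    rw [← h]; simp

-- ---- B-side: splitOn on ' ' computes wordsB ----

theorem splitOngo_space (fuel : Nat) : ∀ (l cur : List Char) (acc : List (List Char)),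
    l.length < fuel →
    PySem.Chars.splitOn.go [' '] fuel l cur acc = acc.reverse ++ wordsB l cur.reverse := by
  induction fuel with
  | zero => intro l cur acc h; omega
  | succ f ih =>
    intro l cur acc h
    cases l with
    | nil => rw [PySem.Chars.splitOn.go.eq_def]; simp [wordsB]
    | cons c rest =>
      rw [PySem.Chars.splitOn.go.eq_def]
      simp only []
      by_cases hc : c = ' '
      · have hp : [' '].isPrefixOf (c :: rest) = true := by simp [List.isPrefixOf, hc]
        rw [if_pos hp]
        have : List.drop [' '].length (c :: rest) = rest := by simp
        rw [this, ih rest [] (cur.reverse :: acc) (by simpa using h)]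
        simp [wordsB, hc]
      · have hp : ¬ ([' '].isPrefixOf (c :: rest) = true) := by
          simp [List.isPrefixOf]; exact fun h' => hc h'.symm
        rw [if_neg hp, ih rest (c :: cur) acc (by simpa using h)]
        simp [wordsB, hc]

theorem splitOn_space (l : List Char) : PySem.Chars.splitOn l [' '] = wordsB l [] := by
  rw [PySem.Chars.splitOn]
  simpa using splitOngo_space (l.length + 1) l [] [] (by omega)

theorem wordsB_append_space : ∀ (l word : List Char),
    wordsB (l ++ [' ']) word = wordsB l word ++ [[]] := by
  intro l
  induction l with
  | nil => intro word; simp [wordsB]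
  | cons c rest ih =>
    intro word
    by_cases hc : c = ' ' <;> simp [wordsB, hc, ih]

-- membership in the words of the padded name = membership in the words of the bare name
theorem mem_words_pad_iff (nl t : List Char) (hne : t ≠ []) :
    (t ∈ wordsB (' ' :: ' ' :: nl ++ [' ', ' ']) [] ↔ t ∈ wordsB nl []) := by
  have h1 : ' ' :: nl ++ [' ', ' '] = ((' ' :: nl) ++ [' ']) ++ [' '] := by simp
  have h2 : wordsB (' ' :: ' ' :: nl ++ [' ', ' ']) []
      = [] :: [] :: (wordsB nl [] ++ [[]] ++ [[]]) := by
    show wordsB (' ' :: (' ' :: nl ++ [' ', ' '])) [] = _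
    rw [wordsB, if_pos rfl, h1]
    show [] :: wordsB ((' ' :: nl ++ [' ']) ++ [' ']) [] = _
    rw [wordsB_append_space]
    show [] :: (wordsB (' ' :: (nl ++ [' '])) [] ++ [[]]) = _
    rw [wordsB, if_pos rfl, wordsB_append_space]
    simp
  rw [h2]
  simp [hne]

-- ---- token-set bridges ----

theorem singles_eval : PySem.Set.ofList (PySem.Str.split₀ pvBigTokens)
    = ["co", "ltd", "cie", "ltee", "bv", "nv", "sa", "llc", "llp", "ltda", "pty",
       "gmbh", "spa", "tech", "technology", "engineering", "partners", "inc", "usa",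
       "design", "germany", "photography", "corporation", "enterprises", "construction",
       "&", "et", "systems", "group", "com", "supply", "business", "electronics", "tool"] := by
  set_option maxRecDepth 4000 in decide

theorem contains_ofList (L : List String) (w : List Char) :
    L.contains (String.ofList w) = (L.map String.toList).contains w := by
  induction L with
  | nil => rfl
  | cons s rest ih =>
    simp only [List.contains_cons, List.map_cons, ih]
    have : (String.ofList w == s) = (w == s.toList) := by
      by_cases h : s = String.ofList w
      · subst h; simp
      · have h' : s.toList ≠ w := fun hw => h (by rw [← hw, String.ofList_toList])
        simp [Ne.symm h, Ne.symm h']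
    rw [this]

theorem contains_bridge (w : List Char) :
    (PySem.Set.ofList (PySem.Str.split₀ pvBigTokens)).contains (String.ofList w)
      = singleTokens.contains w := by
  show (PySem.Set.ofList (PySem.Str.split₀ pvBigTokens)).contains (String.ofList w) = _
  rw [PySem.Set.contains, singles_eval, contains_ofList]
  rfl

theorem singles_ok : ∀ t ∈ singleTokens, t ≠ [] ∧ ' ' ∉ t := by decide

theorem tokens_bridge (Q : List Char → Prop) :
    (∃ tok ∈ corporateTokens, Q (' ' :: tok.toList ++ [' '])) ↔
      Q (' ' :: "l l c".toList ++ [' ']) ∨ ∃ t ∈ singleTokens, Q (' ' :: t ++ [' ']) := by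
  constructor
  · rintro ⟨tok, htok, hQ⟩
    fin_cases htok <;> first
      | (left; exact hQ)
      | (right; exact ⟨_, by decide, hQ⟩)
  · rintro (h | ⟨t, ht, hQ⟩)
    · exact ⟨"l l c", by decide, h⟩
    · fin_cases ht <;> exact ⟨_, by decide, hQ⟩

-- ---- A-side loop characterisation ----

theorem loopA_eq_any (name : String) : ∀ (toks : List String),
    loopA name toks = toks.any (fun tok => decide (PySem.Str.count name (" " ++ tok ++ " ") ≠ 0)) := by
  intro toks
  induction toks with
  | nil => simp [loopA]
  | cons tok rest ih =>
    rw [loopA, List.any_cons, ← ih]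
    by_cases h : PySem.Str.count name (" " ++ tok ++ " ") ≠ 0 <;> simp [h]

theorem pad_toList (tok : String) : (" " ++ tok ++ " ").toList = ' ' :: tok.toList ++ [' '] := by
  simp

theorem loopA_iff (name : String) : loopA name corporateTokens = true ↔
    ∃ tok ∈ corporateTokens, (' ' :: tok.toList ++ [' ']) <:+: name.toList := by
  rw [loopA_eq_any, List.any_eq_true]
  constructor
  · rintro ⟨tok, htok, hc⟩
    refine ⟨tok, htok, ?_⟩
    have := (count_ne_zero_iff name.toList (" " ++ tok ++ " ").toList (by simp)).mp
      (by simpa using hc)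
    simpa [pad_toList] using this
  · rintro ⟨tok, htok, hinf⟩
    refine ⟨tok, htok, ?_⟩
    have := (count_ne_zero_iff name.toList (" " ++ tok ++ " ").toList (by simp)).mpr
      (by simpa [pad_toList] using hinf)
    simpa using this

-- ---- normalisation: A's four replaces = B's one char-map ----

theorem maps_eq (l : List Char) :
    ((((l.map (fun c => if c = '.' then ' ' else c)).map (fun c => if c = ',' then ' ' else c)).map
      (fun c => if c = ')' then ' ' else c)).map (fun c => if c = '(' then ' ' else c))
      = l.map pvNormChar := by
  simp only [List.map_map]
  apply List.map_congr_left
  intro a _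
  simp only [Function.comp]
  by_cases h1 : a = '.'
  · subst h1; decide
  by_cases h2 : a = ','
  · subst h2; decide
  by_cases h3 : a = ')'
  · subst h3; decide
  by_cases h4 : a = '('
  · subst h4; decide
  simp [pvNormChar, h1, h2, h3, h4]

theorem nameA_toList (s : String) :
    (PySem.Str.replace (PySem.Str.replace (PySem.Str.replace (PySem.Str.replace
      ("  " ++ PySem.Str.lower s ++ "  ") "." " ") "," " ") ")" " ") "(" " ").toList
        = ' ' :: ' ' :: (PySem.Str.lower s).toList.map pvNormChar ++ [' ', ' '] := by
  have hsp : pvNormChar ' ' = ' ' := by decide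
  simp only [PySem.Str.toList_replace, String.toList_append,
    show ("." : String).toList = ['.'] from rfl,
    show ("," : String).toList = [','] from rfl,
    show (")" : String).toList = [')'] from rfl,
    show ("(" : String).toList = ['('] from rfl,
    show (" " : String).toList = [' '] from rfl,
    show ("  " : String).toList = [' ', ' '] from rfl,
    replace_single, maps_eq]
  simp [hsp]

-- ===== VERDICT (by name: the statement is the Claim_ definition above) =====
theorem isCorporateDonor_spec : Claim_equal_isCorporateDonor := by
  intro donorName _
  unfold Spec_isCorporateDonor
  show isCorporateDonor donorName = isCorporateDonor_alt donorName
  simp only [isCorporateDonor, isCorporateDonor_alt, PySem.Str.toList_lower]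
  set normL := List.map pvNormChar (PySem.Chars.lower donorName.toList) with hnorm
  have hA := nameA_toList donorName
  simp only [PySem.Str.toList_lower] at hA
  have hBpad : ("  " ++ String.ofList normL ++ "  ").toList
      = ' ' :: ' ' :: normL ++ [' ', ' '] := by
    simp [String.toList_append, String.toList_ofList,
      show ("  " : String).toList = [' ', ' '] from rfl]
  have heq : ∀ a b : Bool, (a = true ↔ b = true) → a = b := by decide
  apply heq
  rw [loopA_iff]
  rw [tokens_bridge (fun xs => xs <:+:
    (PySem.Str.replace (PySem.Str.replace (PySem.Str.replace (PySem.Str.replace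
      ("  " ++ PySem.Str.lower donorName ++ "  ") "." " ") "," " ") ")" " ") "(" " ").toList)]
  rw [hA]
  by_cases hllc : PySem.Str.isIn " l l c " ("  " ++ String.ofList normL ++ "  ")
  · rw [if_pos hllc]
    simp only [iff_true]
    left
    have := (PySem.Str.isIn_iff_infix _ _).mp hllc
    rw [hBpad] at this
    simpa using this
  · rw [if_neg hllc]
    have hnl : ¬ ((' ' :: "l l c".toList ++ [' ']) <:+: (' ' :: ' ' :: normL ++ [' ', ' '])) := by
      intro h
      exact hllc ((PySem.Str.isIn_iff_infix _ _).mpr (by rw [hBpad]; simpa using h))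
    -- B's branch: any over the words of normL
    have hBany : ((PySem.Chars.splitOn (String.ofList normL).toList [' ']).map String.ofList).any
        (fun w => (PySem.Set.ofList (PySem.Str.split₀ pvBigTokens)).contains w)
        = (wordsB normL []).any (fun w => singleTokens.contains w) := by
      rw [String.toList_ofList, splitOn_space, List.any_map]
      simp only [Function.comp_def, contains_bridge]
    rw [hBany]
    constructor
    · rintro (h | ⟨t, ht, hinf⟩)
      · exact absurd h hnl
      · rw [List.any_eq_true]
        obtain ⟨htne, htsp⟩ := singles_ok t ht
        refine ⟨t, ?_, by simpa using ht⟩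
        rw [← mem_words_pad_iff normL t htne]
        have hshape : ' ' :: ' ' :: normL ++ [' ', ' ']
            = (' ' :: (' ' :: normL ++ [' '])) ++ [' '] := by simp
        rw [hshape]
        exact (core (' ' :: normL ++ [' ']) t htne htsp).mpr (by
          rw [← hshape]; simpa using hinf)
    · intro h
      rw [List.any_eq_true] at h
      obtain ⟨w, hw, hmem⟩ := h
      right
      obtain ⟨htne, htsp⟩ := singles_ok w (by simpa using hmem)
      refine ⟨w, by simpa using hmem, ?_⟩
      rw [← mem_words_pad_iff normL w htne] at hw
      have hshape : ' ' :: ' ' :: normL ++ [' ', ' ']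
          = (' ' :: (' ' :: normL ++ [' '])) ++ [' '] := by simp
      rw [hshape] at hw
      have := (core (' ' :: normL ++ [' ']) w htne htsp).mp hw
      rw [← hshape] at this
      simpa using this
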